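-- pv_equiv track=rewrite | github.com/lekuid/Practice | KnightToPawn.py | red_knight
-- ===== SOURCE A (Python) =====
-- def red_knight(N, P):
--     knight = dis, color = (0, N)
--     count = 0
--     while dis < P:
--         P+=1
--         dis+=2
--         count+=1
--
--     if color == 1:
--         knight = ('Black', dis)
--     else:
--         knight = ('White', dis)
--     return knight
-- ===== SOURCE B (Python) =====
-- def red_knight(N, P):
--     # Closed form: the loop shrinks the gap P-dis by 1 per step (dis+=2, P+=1),
--     # so it runs exactly max(P,0) times and ends with dis = 2*P (or 0 if P<=0).
--     dis = 2 * P if P > 0 else 0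
--     return ('Black', dis) if N == 1 else ('White', dis)
-- ===== Notes on version B (the rewrite author's own statement) =====
-- stated objective: faster
-- what changed: Replaces the chase loop (which runs P iterations, each closing the gap by 1) with the closed form dis = 2*P if P>0 else 0 and a direct branch on the color.
import Mathlib
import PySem

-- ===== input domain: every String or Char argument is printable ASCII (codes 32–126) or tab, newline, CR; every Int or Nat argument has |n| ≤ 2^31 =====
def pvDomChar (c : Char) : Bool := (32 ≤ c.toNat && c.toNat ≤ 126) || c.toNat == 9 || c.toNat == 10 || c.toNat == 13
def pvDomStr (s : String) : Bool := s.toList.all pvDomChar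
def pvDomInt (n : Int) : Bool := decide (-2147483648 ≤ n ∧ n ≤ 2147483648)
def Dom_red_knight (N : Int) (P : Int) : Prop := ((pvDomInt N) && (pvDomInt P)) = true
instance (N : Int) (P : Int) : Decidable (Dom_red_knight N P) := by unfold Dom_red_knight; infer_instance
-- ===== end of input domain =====

-- B replaces A's O(P) chase loop by the closed form dis = 2*P (0 if P ≤ 0); objective: faster.


-- ===== PORT A =====
-- the while loop: while dis < P: P+=1; dis+=2 ; returns the final dis
def redKnightLoop (dis P : Int) : Int :=
  if dis < P then redKnightLoop (dis + 2) (P + 1) else dis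
termination_by (P - dis).toNat
decreasing_by omega

def red_knight (N : Int) (P : Int) : String × Int :=
  let dis : Int := 0
  let color : Int := N
  let dis := redKnightLoop dis P
  if color == 1 then ("Black", dis) else ("White", dis)

-- ===== PORT B =====
def red_knight_alt (N : Int) (P : Int) : String × Int :=
  let dis : Int := if P > 0 then 2 * P else 0
  if N == 1 then ("Black", dis) else ("White", dis)

-- ===== PRECONDITION & SPEC =====
def Spec_red_knight (N : Int) (P : Int) (out : String × Int) : Prop := out = red_knight_alt N P
instance (N : Int) (P : Int) (out : String × Int) : Decidable (Spec_red_knight N P out) := by unfold Spec_red_knight; infer_instance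

-- ===== CLAIM (what is proved, stated in full; the proofs are below) =====
def Claim_equal_red_knight : Prop := ∀ (N : Int) (P : Int), Dom_red_knight N P → Spec_red_knight N P (red_knight N P)

-- ===== LEMMAS AND PROOFS =====
theorem redKnightLoop_of_lt (dis P : Int) (h : dis < P) : redKnightLoop dis P = 2 * P - dis := by
  rw [redKnightLoop]
  by_cases h2 : dis + 2 < P + 1
  · rw [if_pos h, redKnightLoop_of_lt (dis + 2) (P + 1) h2]; ring
  · rw [if_pos h, redKnightLoop, if_neg h2]; omega
termination_by (P - dis).toNat
decreasing_by omega

theorem redKnightLoop_eq (P : Int) : redKnightLoop 0 P = if P > 0 then 2 * P else 0 := by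
  by_cases h : (0 : Int) < P
  · rw [redKnightLoop_of_lt 0 P h, if_pos h]; ring
  · rw [redKnightLoop, if_neg (by omega), if_neg h]

-- ===== VERDICT (by name: the statement is the Claim_ definition above) =====
theorem red_knight_spec : Claim_equal_red_knight := by
  intro N P _
  unfold Spec_red_knight red_knight red_knight_alt
  simp only [redKnightLoop_eq]
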